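-- pv_equiv track=rewrite | github.com/Wettersten/metaxaqr-database-builder | src/meta_clustering/cluster_stats.py | fract_cluster
-- ===== SOURCE A (Python) =====
-- def fract_cluster(cluster_list):
--     all_tax = [[] for i in range(len(max(cluster_list, key=len)))]
--     for tax in cluster_list:
--         if len(all_tax) == len(tax):
--             for i in range(len(tax)):
--                 all_tax[i].append(tax[i])
--         else:
--             for i in range(0, len(tax)-1):
--                 all_tax[i].append(tax[i])
--             for i in range(
--                            len(tax)-1, len(all_tax)-1
--                            ):
--                 all_tax[i].append("-")
--             all_tax[-1].append(tax[-1])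
--
--     return all_tax
-- ===== SOURCE B (Python) =====
-- def fract_cluster(cluster_list):
--     m = len(max(cluster_list, key=len))
--     padded = [t if len(t) == m else t[:-1] + ["-"] * (m - len(t)) + [t[-1]]
--               for t in cluster_list]
--     return [list(col) for col in zip(*padded)]
-- ===== Notes on version B (the rewrite author's own statement) =====
-- stated objective: simpler
-- what changed: A interleaves padding and transposition in one loop that appends to each column list in place; B first pads every row to the maximum width (keeping the last element in the last column) and then transposes the padded rows in a separate zip pass.
import Mathlib
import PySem

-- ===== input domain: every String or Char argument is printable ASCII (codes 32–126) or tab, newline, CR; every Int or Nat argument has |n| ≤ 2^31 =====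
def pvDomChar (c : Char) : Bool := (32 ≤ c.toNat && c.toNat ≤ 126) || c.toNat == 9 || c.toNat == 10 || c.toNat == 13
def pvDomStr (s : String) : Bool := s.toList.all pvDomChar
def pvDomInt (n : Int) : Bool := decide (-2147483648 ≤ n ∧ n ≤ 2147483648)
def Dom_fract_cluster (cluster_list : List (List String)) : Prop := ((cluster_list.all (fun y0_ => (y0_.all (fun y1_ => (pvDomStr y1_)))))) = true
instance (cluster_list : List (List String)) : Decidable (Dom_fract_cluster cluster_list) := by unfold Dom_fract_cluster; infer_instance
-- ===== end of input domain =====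

-- B pads every row to the maximum width first and then transposes the padded rows in a
-- separate zip pass, instead of A's single loop that appends into per-column lists
-- (objective: simpler).

-- ===== PORT A =====
-- total form of Python's `all_tax[i].append(v)`: append v to the i-th inner list
-- (a negative i counts from the end); an out-of-range index (IndexError, excluded by
-- Pre_) leaves xss unchanged
def pyAppendAt (xss : List (List String)) (i : Int) (v : String) : List (List String) :=
  let j := if i < 0 then i + xss.length else i
  if 0 ≤ j ∧ j < (xss.length : Int) then xss.set j.toNat (xss.getD j.toNat [] ++ [v]) else xss

def fract_cluster (cluster_list : List (List String)) : List (List String) :=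
  match PySem.List.max? cluster_list (fun t => PySem.List.len t) with
  | none => []      -- Python: `max` raises ValueError on an empty list; excluded by Pre_
  | some mx =>
    let init := (List.range mx.length).map (fun _ => ([] : List String))
    cluster_list.foldl (fun all_tax tax =>
      if PySem.List.len all_tax == PySem.List.len tax then
        (PySem.List.pyRange 0 (PySem.List.len tax) 1).foldl
          (fun acc i => pyAppendAt acc i (PySem.List.pyGetD tax i "")) all_tax
      else
        let s1 := (PySem.List.pyRange 0 (PySem.List.len tax - 1) 1).foldl
          (fun acc i => pyAppendAt acc i (PySem.List.pyGetD tax i "")) all_tax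
        let s2 := (PySem.List.pyRange (PySem.List.len tax - 1) (PySem.List.len s1 - 1) 1).foldl
          (fun acc i => pyAppendAt acc i "-") s1
        pyAppendAt s2 (-1) (PySem.List.pyGetD tax (-1) "")) init

-- ===== PORT B =====
def fract_cluster_alt (cluster_list : List (List String)) : List (List String) :=
  match PySem.List.max? cluster_list (fun t => PySem.List.len t) with
  | none => []      -- Python: `max` raises ValueError on an empty list; excluded by Pre_
  | some mx =>
    let m := mx.length
    let padded := cluster_list.map (fun t =>
      if t.length == m then t
      else PySem.List.slice t none (some (-1)) ++ List.replicate (m - t.length) "-"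
             ++ [PySem.List.pyGetD t (-1) ""])
    -- zip(*padded): columns up to the shortest row, hand-ported (exact for lists of lists)
    match padded with
    | [] => []
    | r :: rs =>
      let n := rs.foldl (fun acc row => min acc row.length) r.length
      (List.range n).map (fun j => padded.map (fun row => row.getD j ""))

-- ===== PRECONDITION & SPEC =====
-- Pre_ excludes exactly the inputs on which Python A raises: the empty list (ValueError
-- from max) and lists that mix an empty row with a nonempty one (IndexError from tax[-1]);
-- B raises the same exceptions there.
def Pre_fract_cluster (cluster_list : List (List String)) : Prop :=
  cluster_list.isEmpty = false ∧
    (cluster_list.all (fun t => !t.isEmpty) = true ∨ cluster_list.all (fun t => t.isEmpty) = true)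
instance (cluster_list : List (List String)) : Decidable (Pre_fract_cluster cluster_list) := by
  unfold Pre_fract_cluster; infer_instance

def pvWitness_fract_cluster : List (List String) := [["a", "b"], ["c"]]

def Spec_fract_cluster (cluster_list : List (List String)) (out : List (List String)) : Prop := out = fract_cluster_alt cluster_list
instance (cluster_list : List (List String)) (out : List (List String)) : Decidable (Spec_fract_cluster cluster_list out) := by unfold Spec_fract_cluster; infer_instance

-- ===== CLAIM (what is proved, stated in full; the proofs are below) =====
def Claim_equal_fract_cluster : Prop := ∀ (cluster_list : List (List String)), Dom_fract_cluster cluster_list → Pre_fract_cluster cluster_list → Spec_fract_cluster cluster_list (fract_cluster cluster_list)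

-- ===== LEMMAS AND PROOFS =====

-- the padded row B builds (same expression as the row lambda in fract_cluster_alt)
def prow (m : Nat) (t : List String) : List String :=
  if t.length == m then t
  else PySem.List.slice t none (some (-1)) ++ List.replicate (m - t.length) "-"
         ++ [PySem.List.pyGetD t (-1) ""]

-- append v at a Nat index (no-op out of range)
def pyAppendNat (xss : List (List String)) (j : Nat) (v : String) : List (List String) :=
  xss.set j (xss.getD j [] ++ [v])

-- append each of vs to the corresponding inner list (extra inner lists untouched)
def zipApp : List (List String) → List String → List (List String)
  | cs, [] => cs
  | [], _ :: _ => []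
  | c :: cs, v :: vs => (c ++ [v]) :: zipApp cs vs

theorem pyAppendAt_natCast (xss : List (List String)) (n : Nat) (v : String) :
    pyAppendAt xss (n : Int) v = pyAppendNat xss n v := by
  have h0 : ¬((n : Int) < 0) := by omega
  unfold pyAppendAt pyAppendNat
  simp only [h0, if_false, Int.toNat_natCast]
  by_cases h : n < xss.length
  · rw [if_pos ⟨by omega, by exact_mod_cast h⟩]
  · rw [if_neg (by omega), List.set_eq_of_length_le (by omega)]

theorem pyAppendAt_neg_one (xss : List (List String)) (v : String) (h : xss ≠ []) :
    pyAppendAt xss (-1) v = pyAppendNat xss (xss.length - 1) v := by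
  have hl : 0 < xss.length := List.length_pos_iff.mpr h
  have h1 : ((-1 : Int) < 0) := by omega
  unfold pyAppendAt pyAppendNat
  simp only [h1, if_true]
  rw [if_pos ⟨by omega, by omega⟩]
  rw [show ((-1 : Int) + (xss.length : Int)).toNat = xss.length - 1 by omega]

theorem pyAppendNat_nil (j : Nat) (v : String) : pyAppendNat [] j v = [] := by
  simp [pyAppendNat]

theorem pyAppendNat_zero_cons (c : List String) (cs : List (List String)) (v : String) :
    pyAppendNat (c :: cs) 0 v = (c ++ [v]) :: cs := by
  simp [pyAppendNat]

theorem pyAppendNat_cons_succ (c : List String) (cs : List (List String)) (j : Nat) (v : String) :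
    pyAppendNat (c :: cs) (j + 1) v = c :: pyAppendNat cs j v := by
  simp [pyAppendNat]

theorem length_zipApp (cs : List (List String)) (vs : List String) :
    (zipApp cs vs).length = cs.length := by
  induction cs generalizing vs with
  | nil => cases vs <;> simp [zipApp]
  | cons c cs ih => cases vs <;> simp [zipApp, ih]

theorem pyAppendNat_eq_take_zipApp (xss : List (List String)) (j : Nat) (v : String) :
    pyAppendNat xss j v = xss.take j ++ zipApp (xss.drop j) [v] := by
  induction xss generalizing j with
  | nil => simp [pyAppendNat_nil, zipApp]
  | cons c cs ih =>
    cases j with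
    | zero => simp [pyAppendNat_zero_cons, zipApp]
    | succ j => simp [pyAppendNat_cons_succ, ih j]

theorem pyAppendNat_append_right (xs ys : List (List String)) (j : Nat) (v : String) :
    pyAppendNat (xs ++ ys) (xs.length + j) v = xs ++ pyAppendNat ys j v := by
  induction xs with
  | nil => simp
  | cons c cs ih =>
    simp only [List.cons_append, List.length_cons]
    rw [show cs.length + 1 + j = (cs.length + j) + 1 by omega, pyAppendNat_cons_succ, ih]

theorem foldl_appendNat_nil (l : List Nat) (f : Nat → Nat) (g : Nat → String) :
    l.foldl (fun a j => pyAppendNat a (f j) (g j)) [] = [] := by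
  induction l with
  | nil => rfl
  | cons x l ih => simp only [List.foldl_cons, pyAppendNat_nil, ih]

theorem foldl_appendNat_shift (l : List Nat) (f : Nat → Nat) (g : Nat → String)
    (c : List String) (cs : List (List String)) :
    l.foldl (fun a j => pyAppendNat a (f j + 1) (g j)) (c :: cs)
      = c :: l.foldl (fun a j => pyAppendNat a (f j) (g j)) cs := by
  induction l generalizing c cs with
  | nil => rfl
  | cons x l ih => simp only [List.foldl_cons, pyAppendNat_cons_succ, ih]

-- sequential appends at indices 0,1,…,n-1 are one zipApp
theorem foldl_appendNat_range (n : Nat) (g : Nat → String) (acc : List (List String)) :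
    (List.range n).foldl (fun a j => pyAppendNat a j (g j)) acc
      = zipApp acc ((List.range n).map g) := by
  induction n generalizing g acc with
  | zero => simp [zipApp]
  | succ n ih =>
    rw [List.range_succ_eq_map]
    simp only [List.foldl_cons, List.foldl_map, List.map_cons, List.map_map,
      Function.comp_def, Nat.succ_eq_add_one]
    cases acc with
    | nil =>
      rw [pyAppendNat_nil,
        foldl_appendNat_nil (List.range n) (fun j => j + 1) (fun j => g (j + 1))]
      simp [zipApp]
    | cons c cs =>
      rw [pyAppendNat_zero_cons,
        foldl_appendNat_shift (List.range n) (fun j => j) (fun j => g (j + 1)),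
        ih (fun j => g (j + 1)) cs]
      simp [zipApp]

-- sequential appends at indices s,s+1,…,s+n-1
theorem foldl_appendNat_offset (s : Nat) (l : List Nat) (g : Nat → String)
    (acc : List (List String)) :
    l.foldl (fun a j => pyAppendNat a (s + j) (g j)) acc
      = acc.take s ++ l.foldl (fun a j => pyAppendNat a j (g j)) (acc.drop s) := by
  induction s generalizing acc with
  | zero => simp
  | succ s ih =>
    cases acc with
    | nil =>
      rw [List.take_nil, List.drop_nil, List.nil_append,
        foldl_appendNat_nil l (fun j => s + 1 + j) g, foldl_appendNat_nil l (fun j => j) g]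
    | cons c cs =>
      rw [show (fun (a : List (List String)) (j : Nat) => pyAppendNat a (s + 1 + j) (g j))
            = (fun a j => pyAppendNat a ((s + j) + 1) (g j)) from
          (by funext a j; rw [show s + 1 + j = (s + j) + 1 by omega]),
        foldl_appendNat_shift l (fun j => s + j) g c cs, ih cs]
      simp

theorem zipApp_append (ws : List String) (acc : List (List String)) (vs : List String) :
    zipApp acc (ws ++ vs)
      = (zipApp acc ws).take ws.length ++ zipApp ((zipApp acc ws).drop ws.length) vs := by
  induction ws generalizing acc with
  | nil => simp [zipApp]
  | cons w ws ih =>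
    cases acc with
    | nil => cases vs <;> simp [zipApp]
    | cons c cs => simp [zipApp, ih cs]

theorem map_range_getD (t : List String) (n : Nat) (h : n ≤ t.length) :
    (List.range n).map (fun j => t.getD j "") = t.take n := by
  apply List.ext_getElem
  · simp [h]
  · intro i h1 h2
    simp only [List.getElem_map, List.getElem_range, List.getElem_take]
    rw [List.getD_eq_getElem]

theorem zipApp_map_range (m : Nat) (F : Nat → List String) (vs : List String)
    (h : vs.length = m) :
    zipApp ((List.range m).map F) vs
      = (List.range m).map (fun j => F j ++ [vs.getD j ""]) := by
  induction m generalizing F vs with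
  | zero =>
    cases vs with
    | nil => simp [zipApp]
    | cons v vs => simp at h
  | succ m ih =>
    cases vs with
    | nil => simp at h
    | cons v vs =>
      have h' : vs.length = m := by simpa using h
      rw [List.range_succ_eq_map]
      simp only [List.map_cons, List.map_map, Function.comp_def, Nat.succ_eq_add_one,
        zipApp, List.getD_cons_zero, List.getD_cons_succ]
      rw [ih (fun j => F (j + 1)) vs h']

-- transposing by repeated zipApp over the rows
theorem fold_zipApp_transpose (m : Nat) (P : List String → List String)
    (rows : List (List String)) (h : ∀ t ∈ rows, (P t).length = m) :
    rows.foldl (fun acc t => zipApp acc (P t)) ((List.range m).map (fun _ => []))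
      = (List.range m).map (fun j => rows.map (fun t => (P t).getD j "")) := by
  induction rows using List.reverseRecOn with
  | nil => simp
  | append_singleton l a ih =>
    rw [List.foldl_append]
    simp only [List.foldl_cons, List.foldl_nil]
    rw [ih (fun t ht => h t (by simp [ht]))]
    rw [zipApp_map_range m _ (P a) (h a (by simp))]
    simp

theorem foldl_min_const (m : Nat) (l : List (List String)) (acc : Nat)
    (hacc : acc = m) (h : ∀ x ∈ l, x.length = m) :
    l.foldl (fun acc row => min acc row.length) acc = m := by
  induction l generalizing acc with
  | nil => simpa using hacc
  | cons x l ih =>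
    simp only [List.foldl_cons]
    exact ih _ (by rw [hacc, h x (by simp)]; simp) (fun y hy => h y (by simp [hy]))

theorem length_prow (m : Nat) (t : List String) (hle : t.length ≤ m)
    (hne : t.length ≠ m → t ≠ []) : (prow m t).length = m := by
  unfold prow
  by_cases h : t.length = m
  · simp [h]
  · have ht : t ≠ [] := hne h
    have h1 : 0 < t.length := List.length_pos_iff.mpr ht
    rw [if_neg (by simpa using h)]
    simp only [PySem.List.slice_to_neg_one, List.length_append, List.length_dropLast,
      List.length_replicate, List.length_cons, List.length_nil]
    omega

theorem foldl_invariant_congr {α β : Type} (l : List α) (f g : β → α → β)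
    (I : β → Prop) (init : β) (hinit : I init)
    (hstep : ∀ acc x, I acc → x ∈ l → f acc x = g acc x ∧ I (g acc x)) :
    l.foldl f init = l.foldl g init := by
  induction l generalizing init with
  | nil => rfl
  | cons x l ih =>
    simp only [List.foldl_cons]
    obtain ⟨he, hI⟩ := hstep init x hinit (by simp)
    rw [he]
    exact ih (g init x) hI (fun acc y ha hy => hstep acc y ha (by simp [hy]))

-- A's per-row update equals one zipApp with B's padded row
theorem stepA_eq (m : Nat) (x : List String) (hle : x.length ≤ m)
    (hne : x.length ≠ m → x ≠ []) (acc : List (List String)) (hacc : acc.length = m) :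
    (if PySem.List.len acc == PySem.List.len x then
        (PySem.List.pyRange 0 (PySem.List.len x) 1).foldl
          (fun a i => pyAppendAt a i (PySem.List.pyGetD x i "")) acc
      else
        let s1 := (PySem.List.pyRange 0 (PySem.List.len x - 1) 1).foldl
          (fun a i => pyAppendAt a i (PySem.List.pyGetD x i "")) acc
        let s2 := (PySem.List.pyRange (PySem.List.len x - 1) (PySem.List.len s1 - 1) 1).foldl
          (fun a i => pyAppendAt a i "-") s1
        pyAppendAt s2 (-1) (PySem.List.pyGetD x (-1) ""))
      = zipApp acc (prow m x) := by
  have hrange0 : ∀ (k : Nat), k ≤ x.length → ∀ (a0 : List (List String)),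
      (PySem.List.pyRange 0 ((k : Nat) : Int) 1).foldl
          (fun a i => pyAppendAt a i (PySem.List.pyGetD x i "")) a0
        = zipApp a0 (x.take k) := by
    intro k hk a0
    rw [PySem.List.pyRange_one]
    rw [show (((k : Nat) : Int) - 0).toNat = k by omega]
    simp only [List.foldl_map]
    refine Eq.trans (PySem.List.foldl_congr_mem _ _
      (fun a j => pyAppendNat a j (x.getD j "")) _ (fun a j _ => by
        simp only [zero_add, pyAppendAt_natCast, PySem.List.pyGetD_natCast])) ?_
    rw [foldl_appendNat_range, map_range_getD x k hk]
  have hrangeS : ∀ (s n : Nat) (a0 : List (List String)),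
      (PySem.List.pyRange (((s : Nat)) : Int) (((s + n : Nat)) : Int) 1).foldl
          (fun a i => pyAppendAt a i "-") a0
        = a0.take s ++ zipApp (a0.drop s) (List.replicate n "-") := by
    intro s n a0
    rw [PySem.List.pyRange_one]
    rw [show ((((s + n : Nat)) : Int) - ((s : Nat) : Int)).toNat = n by omega]
    simp only [List.foldl_map]
    refine Eq.trans (PySem.List.foldl_congr_mem _ _
      (fun a k => pyAppendNat a (s + k) "-") _ (fun a k _ => by
        rw [show ((s : Int) + (k : Int)) = (((s + k : Nat)) : Int) by push_cast; ring,
          pyAppendAt_natCast])) ?_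
    refine Eq.trans (foldl_appendNat_offset s (List.range n) (fun _ => "-") a0) ?_
    rw [foldl_appendNat_range]
    rw [List.map_const', List.length_range]
  by_cases hL : x.length = m
  · have hc : (PySem.List.len acc == PySem.List.len x) = true := by
      simp only [PySem.List.len_eq, beq_iff_eq, Int.natCast_inj]
      omega
    rw [if_pos hc]
    have hprow : prow m x = x := by simp [prow, hL]
    rw [hprow]
    simp only [PySem.List.len_eq]
    rw [hrange0 x.length le_rfl acc, List.take_length]
  · have hx : x ≠ [] := hne hL
    have h1 : 0 < x.length := List.length_pos_iff.mpr hx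
    have hlt : x.length < m := lt_of_le_of_ne hle hL
    have hc : ¬((PySem.List.len acc == PySem.List.len x) = true) := by
      simp only [PySem.List.len_eq, beq_iff_eq, Int.natCast_inj]
      omega
    rw [if_neg hc]
    simp only [PySem.List.len_eq]
    rw [show ((x.length : Int) - 1) = (((x.length - 1 : Nat)) : Int) by omega]
    rw [hrange0 (x.length - 1) (by omega) acc]
    rw [show x.take (x.length - 1) = x.dropLast by simp [List.dropLast_eq_take]]
    rw [length_zipApp, hacc]
    rw [show ((m : Int) - 1) = ((((x.length - 1) + (m - x.length) : Nat)) : Int) by omega]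
    rw [hrangeS (x.length - 1) (m - x.length) (zipApp acc x.dropLast)]
    set T2 := zipApp ((zipApp acc x.dropLast).drop (x.length - 1))
        (List.replicate (m - x.length) "-") with hT2
    have hS : (zipApp acc x.dropLast).length = m := by rw [length_zipApp, hacc]
    have hlenT2 : T2.length = m - (x.length - 1) := by
      rw [hT2, length_zipApp, List.length_drop, hS]
    have hTne : (zipApp acc x.dropLast).take (x.length - 1) ++ T2 ≠ [] := by
      intro hcon
      have hc' := congrArg List.length hcon
      simp only [List.length_append, List.length_take, hS, hlenT2, List.length_nil] at hc'
      omega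
    rw [pyAppendAt_neg_one _ _ hTne]
    have hlenTot : ((zipApp acc x.dropLast).take (x.length - 1) ++ T2).length = m := by
      simp only [List.length_append, List.length_take, hS, hlenT2]
      omega
    rw [hlenTot]
    have hltake : ((zipApp acc x.dropLast).take (x.length - 1)).length = x.length - 1 := by
      rw [List.length_take, hS]
      omega
    rw [show m - 1
        = ((zipApp acc x.dropLast).take (x.length - 1)).length + (m - x.length) by
      rw [hltake]; omega]
    rw [pyAppendNat_append_right]
    rw [show prow m x = x.dropLast ++ (List.replicate (m - x.length) "-"
        ++ [PySem.List.pyGetD x (-1) ""]) by simp [prow, hL, PySem.List.slice_to_neg_one]]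
    rw [zipApp_append x.dropLast acc
      (List.replicate (m - x.length) "-" ++ [PySem.List.pyGetD x (-1) ""])]
    rw [List.length_dropLast]
    congr 1
    rw [zipApp_append (List.replicate (m - x.length) "-")
      ((zipApp acc x.dropLast).drop (x.length - 1)) [PySem.List.pyGetD x (-1) ""]]
    rw [List.length_replicate, ← hT2]
    exact pyAppendNat_eq_take_zipApp T2 (m - x.length) (PySem.List.pyGetD x (-1) "")

-- ===== VERDICT (by name: the statement is the Claim_ definition above) =====
theorem fract_cluster_spec : Claim_equal_fract_cluster := by
  intro cl hdom hpre
  obtain ⟨hne0, hrows⟩ := hpre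
  have hne : cl ≠ [] := by simpa using hne0
  obtain ⟨r, rs, rfl⟩ := List.exists_cons_of_ne_nil hne
  unfold Spec_fract_cluster fract_cluster fract_cluster_alt
  cases hmax : PySem.List.max? (r :: rs) (fun t => PySem.List.len t) with
  | none => exact absurd ((PySem.List.max?_eq_none_iff _ _).mp hmax) (by simp)
  | some mx =>
    simp only [List.map_cons]
    have hmx_mem := PySem.List.max?_mem hmax
    have hle : ∀ t ∈ r :: rs, t.length ≤ mx.length := fun t ht => by
      have h := PySem.List.max?_isMax hmax t ht
      simpa using h
    have hrow : ∀ t ∈ r :: rs, t.length ≠ mx.length → t ≠ [] := by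
      intro t ht hL
      rcases hrows with h | h
      · have h' := List.all_eq_true.mp h t ht
        simpa using h'
      · have h1 := List.all_eq_true.mp h t ht
        have h2 := List.all_eq_true.mp h mx hmx_mem
        simp only [List.isEmpty_iff] at h1 h2
        exact absurd (by rw [h1, h2]) hL
    refine Eq.trans (Eq.trans
      (foldl_invariant_congr _ _ (fun acc t => zipApp acc (prow mx.length t))
        (fun acc => acc.length = mx.length) _ (by simp)
        (fun acc x hacc hx =>
          ⟨stepA_eq mx.length x (hle x hx) (hrow x hx) acc hacc,
            by simp only [length_zipApp]; exact hacc⟩))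
      (fold_zipApp_transpose mx.length (prow mx.length) (r :: rs)
        (fun t ht => length_prow mx.length t (hle t ht) (hrow t ht)))) ?_
    have hpadfun : (fun (t : List String) => if t.length == mx.length then t
        else PySem.List.slice t none (some (-1)) ++ List.replicate (mx.length - t.length) "-"
          ++ [PySem.List.pyGetD t (-1) ""]) = prow mx.length := by
      funext t
      rfl
    rw [hpadfun]
    have hn : (rs.map (prow mx.length)).foldl (fun acc row => min acc row.length)
        ((prow mx.length r).length) = mx.length := by
      apply foldl_min_const
      · exact length_prow mx.length r (hle r (by simp)) (hrow r (by simp))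
      · intro y hy
        obtain ⟨t, ht, rfl⟩ := List.mem_map.mp hy
        exact length_prow mx.length t (hle t (by simp [ht])) (hrow t (by simp [ht]))
    rw [show (if (r.length == mx.length) = true then r
        else PySem.List.slice r none (some (-1)) ++ List.replicate (mx.length - r.length) "-"
          ++ [PySem.List.pyGetD r (-1) ""]) = prow mx.length r from rfl]
    rw [hn]
    simp [List.map_cons, List.map_map, Function.comp_def]
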